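-- pv_equiv track=rewrite | github.com/Fly-Eugene/Algorithm | 백준/BJ_17609_회문.py | check
-- ===== SOURCE A (Python) =====
-- def check(palin):
--
--     left, right = 0, len(palin)-1
--
--     while left < right:
--         if palin[left] == palin[right]:
--             left +=1
--             right -= 1
--         else:
--             res1 = doubleCheck(left + 1, right, palin)
--             res2 = doubleCheck(left, right-1, palin)
--
--             if res1 or res2:
--                 return 1
--             else:
--                 return 2
--
--     return 0
--
-- def doubleCheck(left, right, palin):
--
--     while left < right:
--         if palin[left] == palin[right]:
--             left += 1
--             right -= 1
--         else:
--             return False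
--     return True
-- ===== SOURCE B (Python) =====
-- def check(palin):
--     def is_pal(s):
--         return s == s[::-1]
--     if is_pal(palin):
--         return 0
--     if any(is_pal(palin[:i] + palin[i + 1:]) for i in range(len(palin))):
--         return 1
--     return 2
-- ===== Notes on version B (the rewrite author's own statement) =====
-- stated objective: alternative
-- what changed: B replaces A's first-mismatch-then-repair two-pointer strategy by a direct exhaustive search: return 0 if the string equals its reverse, else 1 if deleting ANY single position yields a palindrome, else 2; correct because a non-palindrome is one-deletion-fixable iff deleting one of the two characters at the first mismatching end pair works (proved as the main Lean lemma).
import Mathlib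
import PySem

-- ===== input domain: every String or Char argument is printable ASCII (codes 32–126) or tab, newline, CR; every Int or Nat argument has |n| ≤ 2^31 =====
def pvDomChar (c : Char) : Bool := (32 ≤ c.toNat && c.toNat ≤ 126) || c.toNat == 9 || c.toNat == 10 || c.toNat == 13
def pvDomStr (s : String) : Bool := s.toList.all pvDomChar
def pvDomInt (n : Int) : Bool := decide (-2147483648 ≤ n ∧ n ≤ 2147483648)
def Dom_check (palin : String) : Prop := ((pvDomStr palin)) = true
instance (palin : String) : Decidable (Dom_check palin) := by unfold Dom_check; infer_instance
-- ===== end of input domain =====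

-- B replaces A's first-mismatch repair strategy by an exhaustive single-deletion search:
-- 0 if the string is a palindrome, 1 if deleting some one position yields a palindrome, else 2
-- (objective: alternative; B is quadratic where A is linear).

-- ===== PORT A =====
-- helper doubleCheck: inward two-pointer scan (on every call check makes, indices stay in range,
-- so comparing the two pyGet? options is exact)
def dcLoop (left right : Int) (p : List Char) : Bool :=
  if _h : left < right then
    if PySem.List.pyGet? p left == PySem.List.pyGet? p right then dcLoop (left + 1) (right - 1) p
    else false
  else true
termination_by (right - left).toNat
decreasing_by omega

-- the main while-loop of check
def checkLoop (left right : Int) (p : List Char) : Int :=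
  if _h : left < right then
    if PySem.List.pyGet? p left == PySem.List.pyGet? p right then checkLoop (left + 1) (right - 1) p
    else
      let res1 := dcLoop (left + 1) right p
      let res2 := dcLoop left (right - 1) p
      if res1 || res2 then 1 else 2
  else 0
termination_by (right - left).toNat
decreasing_by omega

def check (palin : String) : Int :=
  checkLoop 0 (PySem.Str.len palin - 1) palin.toList

-- ===== PORT B =====
-- is_pal(s): s == s[::-1]; the deletion candidate palin[:i] + palin[i+1:] is the two slices appended
def check_alt (palin : String) : Int :=
  let l := palin.toList
  if l == l.reverse then 0
  else if (PySem.List.pyRange 0 (PySem.Str.len palin) 1).any (fun i =>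
      let t := PySem.List.slice l none (some i) ++ PySem.List.slice l (some (i + 1)) none
      t == t.reverse)
    then 1 else 2

-- ===== PRECONDITION & SPEC =====
def Spec_check (palin : String) (out : Int) : Prop := out = check_alt palin
instance (palin : String) (out : Int) : Decidable (Spec_check palin out) := by unfold Spec_check; infer_instance

-- ===== CLAIM (what is proved, stated in full; the proofs are below) =====
def Claim_equal_check : Prop := ∀ (palin : String), Dom_check palin → Spec_check palin (check palin)

-- ===== LEMMAS AND PROOFS =====

-- the B-side body on the list of characters (check_alt palin = bruteBody palin.toList)
def bruteBody (l : List Char) : Int :=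
  if l == l.reverse then 0
  else if (PySem.List.pyRange 0 (l.length : Int) 1).any (fun i =>
      let t := PySem.List.slice l none (some i) ++ PySem.List.slice l (some (i + 1)) none
      t == t.reverse)
    then 1 else 2

theorem check_alt_eq (palin : String) : check_alt palin = bruteBody palin.toList := by
  simp only [check_alt, bruteBody, PySem.Str.len_eq]
  rfl

theorem pal_short (l : List Char) (h : l.length ≤ 1) : l = l.reverse := by
  match l, h with
  | [], _ => rfl
  | [c], _ => rfl

theorem pal_iff (l : List Char) :
    l = l.reverse ↔ ∀ k, k < l.length → l[k]? = l[l.length - 1 - k]? := by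
  constructor
  · intro h k hk
    conv_lhs => rw [h]
    exact List.getElem?_reverse hk
  · intro h
    apply List.ext_getElem?
    intro i
    by_cases hi : i < l.length
    · rw [List.getElem?_reverse hi]; exact h i hi
    · rw [List.getElem?_eq_none (by omega), List.getElem?_eq_none (by simpa using hi)]

-- the inclusive two-pointer window palin[a..b]
def pvSub (l : List Char) (a b : Nat) : List Char := (l.drop a).take (b + 1 - a)

theorem pvSub_decomp (l : List Char) (a b : Nat) (hab : a < b) (hb : b < l.length) :
    pvSub l a b = l[a]'(by omega) :: (pvSub l (a+1) (b-1) ++ [l[b]'hb]) := by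
  unfold pvSub
  rw [List.drop_eq_getElem_cons (by omega : a < l.length)]
  have h1 : b + 1 - a = (b - a - 1 + 1) + 1 := by omega
  rw [h1, List.take_succ_cons]
  have h3 : (l.drop (a+1))[b - a - 1]? = some (l[b]'hb) := by
    rw [List.getElem?_drop, show a + 1 + (b - a - 1) = b by omega, List.getElem?_eq_getElem hb]
  have h4 : (l.drop (a+1)).take (b - a - 1 + 1)
      = (l.drop (a+1)).take (b - a - 1) ++ [l[b]'hb] := by
    rw [List.take_add_one, h3]; rfl
  rw [h4]
  have h2 : b - 1 + 1 - (a + 1) = b - a - 1 := by omega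
  rw [h2]

theorem pvSub_len_le (l : List Char) (a b : Nat) (h : b ≤ a) : (pvSub l a b).length ≤ 1 := by
  unfold pvSub; simp; omega

-- doubleCheck(a, b, palin) is the palindrome test of the inclusive window palin[a..b]
theorem dc_eq (l : List Char) (a b : Nat) (hb : b < l.length) :
    dcLoop (a : Int) (b : Int) l = decide (pvSub l a b = (pvSub l a b).reverse) := by
  rw [dcLoop]
  by_cases hab : a < b
  · have ha' : a < l.length := by omega
    have ga : PySem.List.pyGet? l (a : Int) = some (l[a]'ha') := by simp [pysem, ha']
    have gb : PySem.List.pyGet? l (b : Int) = some (l[b]'hb) := by simp [pysem, hb]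
    rw [dif_pos (by exact_mod_cast hab), ga, gb]
    by_cases hc : l[a]'ha' = l[b]'hb
    · rw [if_pos (by simp [hc])]
      rw [show (a : Int) + 1 = ((a + 1 : Nat) : Int) by push_cast; ring,
          show (b : Int) - 1 = ((b - 1 : Nat) : Int) by omega]
      rw [dc_eq l (a+1) (b-1) (by omega)]
      rw [pvSub_decomp l a b hab hb]
      simp [hc]
    · rw [if_neg (by simp [hc])]
      rw [pvSub_decomp l a b hab hb]
      simp [hc]
  · rw [dif_neg (by exact_mod_cast hab)]
    exact (decide_eq_true (pal_short _ (pvSub_len_le l a b (by omega)))).symm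
termination_by b - a
decreasing_by omega

-- the inclusive window is a palindrome iff the mirrored index pairs of l match on it
theorem pvSub_pal_iff (l : List Char) (a b : Nat) (hb : b < l.length) (hab : a ≤ b + 1) :
    (pvSub l a b = (pvSub l a b).reverse) ↔ (∀ j, a ≤ j → j ≤ b → l[j]? = l[a + b - j]?) := by
  rw [pal_iff]
  have hlen : (pvSub l a b).length = b + 1 - a := by unfold pvSub; simp; omega
  have hget : ∀ k, k < b + 1 - a → (pvSub l a b)[k]? = l[a + k]? := by
    intro k hk
    unfold pvSub
    rw [List.getElem?_take, if_pos hk, List.getElem?_drop]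
  constructor
  · intro h j hja hjb
    have := h (j - a) (by rw [hlen]; omega)
    rw [hget _ (by omega), hlen, hget _ (by omega),
        show a + (j - a) = j by omega,
        show a + (b + 1 - a - 1 - (j - a)) = a + b - j by omega] at this
    exact this
  · intro h k hk
    rw [hlen] at hk
    rw [hget _ hk, hlen, hget _ (by omega)]
    have := h (a + k) (by omega) (by omega)
    rw [show a + b - (a + k) = a + (b + 1 - a - 1 - k) by omega] at this
    exact this

-- erasing index i leaves a palindrome iff the mirrored pairs of the shortened list match
theorem erase_pal_iff (l : List Char) (i : Nat) (hi : i < l.length) :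
    (l.eraseIdx i = (l.eraseIdx i).reverse) ↔
      (∀ j, j < l.length - 1 →
        (if j < i then l[j]? else l[j+1]?)
          = (if l.length - 2 - j < i then l[l.length - 2 - j]? else l[l.length - 1 - j]?)) := by
  rw [pal_iff, List.length_eraseIdx_of_lt hi]
  have key : ∀ j, j < l.length - 1 →
      (((l.eraseIdx i)[j]? = (l.eraseIdx i)[l.length - 1 - 1 - j]?) ↔
        ((if j < i then l[j]? else l[j+1]?)
          = (if l.length - 2 - j < i then l[l.length - 2 - j]? else l[l.length - 1 - j]?))) := by
    intro j hj
    rw [List.getElem?_eraseIdx, List.getElem?_eraseIdx,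
        show l.length - 1 - 1 - j = l.length - 2 - j from by omega]
    by_cases h' : l.length - 2 - j < i
    · rw [if_pos h', if_pos h']
    · rw [if_neg h', if_neg h', show l.length - 2 - j + 1 = l.length - 1 - j from by omega]
  constructor
  · intro h j hj; exact (key j hj).mp (h j hj)
  · intro h j hj; exact (key j hj).mpr (h j hj)

-- the heart of the equivalence: with the first mismatching end pair at (a, n-1-a), some single
-- deletion yields a palindrome iff one of A's two candidate windows is a palindrome
theorem del_iff (l : List Char) (a : Nat) (ha : a < l.length - 1 - a)
    (hinv : ∀ k, k < a → l[k]? = l[l.length - 1 - k]?)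
    (hmis : l[a]? ≠ l[l.length - 1 - a]?) :
    (∃ i, i < l.length ∧ l.eraseIdx i = (l.eraseIdx i).reverse) ↔
      ((pvSub l (a+1) (l.length - 1 - a) = (pvSub l (a+1) (l.length - 1 - a)).reverse) ∨
       (pvSub l a (l.length - 2 - a) = (pvSub l a (l.length - 2 - a)).reverse)) := by
  have hn : a + 2 ≤ l.length := by omega
  rw [pvSub_pal_iff l (a+1) (l.length - 1 - a) (by omega) (by omega),
      pvSub_pal_iff l a (l.length - 2 - a) (by omega) (by omega)]
  constructor
  · rintro ⟨i, hi, hp⟩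
    rw [erase_pal_iff l i hi] at hp
    rcases Nat.lt_or_ge a i with hia | hia
    · rcases Nat.lt_or_ge (l.length - 2 - a) i with hib | hib
      · -- i past both candidate spots: window s2 is a palindrome
        right
        intro j hja hjb
        have := hp j (by omega)
        rw [if_pos (show j < i from by omega),
            if_pos (show l.length - 2 - j < i from by omega)] at this
        rw [show a + (l.length - 2 - a) - j = l.length - 2 - j from by omega]
        exact this
      · -- a < i ≤ n-2-a is impossible: it would force l[a] = l[n-1-a]
        exfalso
        have := hp a (by omega)
        rw [if_pos hia, if_neg (show ¬(l.length - 2 - a < i) from by omega)] at this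
        exact hmis this
    · -- i ≤ a: window s1 is a palindrome
      left
      intro j hja hjb
      have := hp (j - 1) (by omega)
      rw [if_neg (show ¬(j - 1 < i) from by omega),
          if_neg (show ¬(l.length - 2 - (j - 1) < i) from by omega),
          show j - 1 + 1 = j from by omega,
          show l.length - 1 - (j - 1) = l.length - j from by omega] at this
      rw [show a + 1 + (l.length - 1 - a) - j = l.length - j from by omega]
      exact this
  · rintro (h1 | h2)
    · -- delete index a
      refine ⟨a, by omega, ?_⟩
      rw [erase_pal_iff l a (by omega)]
      intro j hj
      rcases Nat.lt_or_ge j a with hja | hja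
      · rw [if_pos hja, if_neg (show ¬(l.length - 2 - j < a) from by omega)]
        exact hinv j hja
      · rcases Nat.lt_or_ge (l.length - 2 - a) j with hjb | hjb
        · rw [if_neg (show ¬(j < a) from by omega),
              if_pos (show l.length - 2 - j < a from by omega)]
          have := hinv (l.length - 2 - j) (by omega)
          rw [show l.length - 1 - (l.length - 2 - j) = j + 1 from by omega] at this
          exact this.symm
        · rw [if_neg (show ¬(j < a) from by omega),
              if_neg (show ¬(l.length - 2 - j < a) from by omega)]
          have := h1 (j + 1) (by omega) (by omega)
          rw [show a + 1 + (l.length - 1 - a) - (j + 1) = l.length - 1 - j from by omega] at this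
          exact this
    · -- delete index n-1-a
      refine ⟨l.length - 1 - a, by omega, ?_⟩
      rw [erase_pal_iff l (l.length - 1 - a) (by omega)]
      intro j hj
      rcases Nat.lt_or_ge j a with hja | hja
      · rw [if_pos (show j < l.length - 1 - a from by omega),
            if_neg (show ¬(l.length - 2 - j < l.length - 1 - a) from by omega)]
        exact hinv j hja
      · rcases Nat.lt_or_ge (l.length - 2 - a) j with hjb | hjb
        · rw [if_neg (show ¬(j < l.length - 1 - a) from by omega),
              if_pos (show l.length - 2 - j < l.length - 1 - a from by omega)]
          have := hinv (l.length - 2 - j) (by omega)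
          rw [show l.length - 1 - (l.length - 2 - j) = j + 1 from by omega] at this
          exact this.symm
        · rw [if_pos (show j < l.length - 1 - a from by omega),
              if_pos (show l.length - 2 - j < l.length - 1 - a from by omega)]
          have := h2 j hja (by omega)
          rw [show a + (l.length - 2 - a) - j = l.length - 2 - j from by omega] at this
          exact this

-- B's deletion candidate palin[:k] + palin[k+1:] is eraseIdx k
theorem slice_del (l : List Char) (k : Nat) :
    PySem.List.slice l none (some (k : Int)) ++ PySem.List.slice l (some ((k : Int) + 1)) none
      = l.eraseIdx k := by
  rw [PySem.List.slice_to_natCast, show (k : Int) + 1 = ((k + 1 : Nat) : Int) by push_cast; ring,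
      PySem.List.slice_from_natCast, List.eraseIdx_eq_take_drop_succ]

-- B's any-test over range(len) is the existence of a palindromic single deletion
theorem any_del_iff (l : List Char) :
    ((PySem.List.pyRange 0 (l.length : Int) 1).any (fun i =>
        let t := PySem.List.slice l none (some i) ++ PySem.List.slice l (some (i + 1)) none
        t == t.reverse) = true)
      ↔ (∃ i, i < l.length ∧ l.eraseIdx i = (l.eraseIdx i).reverse) := by
  rw [List.any_eq_true]
  constructor
  · rintro ⟨x, hx, hp⟩
    rw [PySem.List.mem_pyRange_one] at hx
    refine ⟨x.toNat, by omega, ?_⟩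
    rw [show x = ((x.toNat : Nat) : Int) by omega, slice_del] at hp
    simpa using hp
  · rintro ⟨k, hk, hp⟩
    refine ⟨(k : Int), by rw [PySem.List.mem_pyRange_one]; omega, ?_⟩
    simp only [slice_del]
    simpa using hp

-- the invariant-carrying form of A's main loop: at symmetric position a it computes bruteBody
theorem loop_eq (l : List Char) (a : Nat) (ha : 2 * a ≤ l.length + 1)
    (hinv : ∀ k, k < a → l[k]? = l[l.length - 1 - k]?) :
    checkLoop (a : Int) ((l.length : Int) - 1 - a) l = bruteBody l := by
  rw [checkLoop]
  by_cases h : (a : Int) < (l.length : Int) - 1 - a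
  · have ha' : a < l.length := by omega
    have hb' : l.length - 1 - a < l.length := by omega
    have ecast : (l.length : Int) - 1 - a = ((l.length - 1 - a : Nat) : Int) := by omega
    have ga : PySem.List.pyGet? l (a : Int) = some (l[a]'ha') := by simp [pysem, ha']
    have gb : PySem.List.pyGet? l ((l.length : Int) - 1 - a)
        = some (l[l.length - 1 - a]'hb') := by rw [ecast]; simp [pysem, hb']
    rw [dif_pos h, ga, gb]
    by_cases hc : l[a]'ha' = l[l.length - 1 - a]'hb'
    · rw [if_pos (by simp [hc])]
      rw [show (a : Int) + 1 = ((a + 1 : Nat) : Int) by push_cast; ring,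
          show (l.length : Int) - 1 - a - 1 = (l.length : Int) - 1 - ((a + 1 : Nat) : Int) by
            push_cast; ring]
      apply loop_eq l (a + 1) (by omega)
      intro k hk
      rcases Nat.lt_or_ge k a with hk' | hk'
      · exact hinv k hk'
      · have : k = a := by omega
        subst this
        rw [List.getElem?_eq_getElem ha', List.getElem?_eq_getElem hb', hc]
    · rw [if_neg (by simp [hc])]
      -- A returns 1 or 2 from the two doubleChecks; B searches all single deletions
      have e1 : (a : Int) + 1 = ((a + 1 : Nat) : Int) := by push_cast; ring
      have e2 : (l.length : Int) - 1 - a - 1 = ((l.length - 2 - a : Nat) : Int) := by omega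
      rw [e1, e2, ecast]
      rw [dc_eq l (a + 1) (l.length - 1 - a) hb', dc_eq l a (l.length - 2 - a) (by omega)]
      have hnp : l ≠ l.reverse := by
        intro hp
        have := (pal_iff l).mp hp a ha'
        rw [List.getElem?_eq_getElem ha', List.getElem?_eq_getElem hb'] at this
        exact hc (Option.some.inj this)
      rw [bruteBody, if_neg (show ¬((l == l.reverse) = true) by simp [hnp])]
      have hmis : l[a]? ≠ l[l.length - 1 - a]? := by
        rw [List.getElem?_eq_getElem ha', List.getElem?_eq_getElem hb']
        intro hq
        exact hc (Option.some.inj hq)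
      have key : ((pvSub l (a+1) (l.length - 1 - a) = (pvSub l (a+1) (l.length - 1 - a)).reverse)
            ∨ (pvSub l a (l.length - 2 - a) = (pvSub l a (l.length - 2 - a)).reverse))
          ↔ (((PySem.List.pyRange 0 (l.length : Int) 1).any (fun i =>
                let t := PySem.List.slice l none (some i) ++ PySem.List.slice l (some (i + 1)) none
                t == t.reverse)) = true) :=
        ((any_del_iff l).trans (del_iff l a (by omega) hinv hmis)).symm
      by_cases hd : (pvSub l (a+1) (l.length - 1 - a) = (pvSub l (a+1) (l.length - 1 - a)).reverse)
          ∨ (pvSub l a (l.length - 2 - a) = (pvSub l a (l.length - 2 - a)).reverse)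
      · rw [if_pos (show (decide (pvSub l (a+1) (l.length - 1 - a) = (pvSub l (a+1) (l.length - 1 - a)).reverse)
              || decide (pvSub l a (l.length - 2 - a) = (pvSub l a (l.length - 2 - a)).reverse)) = true from by
            simp only [Bool.or_eq_true, decide_eq_true_eq]; exact hd),
           if_pos (key.mp hd)]
      · rw [if_neg (show ¬((decide (pvSub l (a+1) (l.length - 1 - a) = (pvSub l (a+1) (l.length - 1 - a)).reverse)
              || decide (pvSub l a (l.length - 2 - a) = (pvSub l a (l.length - 2 - a)).reverse)) = true) from by
            simp only [Bool.or_eq_true, decide_eq_true_eq]; exact hd),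
           if_neg (fun hq => hd (key.mpr hq))]
  · rw [dif_neg h]
    -- the loop finished: every pair matched, so l is a palindrome and B returns 0 too
    have hp : l = l.reverse := by
      rw [pal_iff]
      intro k hk
      rcases Nat.lt_trichotomy k (l.length - 1 - k) with hlt | heq | hgt
      · exact hinv k (by omega)
      · conv_rhs => rw [← heq]
      · have hj : l.length - 1 - k < a := by omega
        have := hinv (l.length - 1 - k) hj
        rw [show l.length - 1 - (l.length - 1 - k) = k by omega] at this
        exact this.symm
    rw [bruteBody, if_pos (by simp [← hp])]

-- ===== VERDICT (by name: the statement is the Claim_ definition above) =====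
theorem check_spec : Claim_equal_check := by
  intro palin _
  show check palin = check_alt palin
  rw [check, check_alt_eq]
  have h0 : (0 : Int) = ((0 : Nat) : Int) := rfl
  have hlen : PySem.Str.len palin - 1 = (palin.toList.length : Int) - 1 - ((0 : Nat) : Int) := by
    simp [pysem]
  rw [h0, hlen]
  exact loop_eq palin.toList 0 (by omega) (by intro k hk; omega)
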